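-- pv_equiv track=rewrite | github.com/V2G-liberty/addon-v2g-liberty | v2g-liberty/rootfs/root/appdaemon/apps/v2g_liberty/data_store.py | _dominant_app_state
-- ===== SOURCE A (Python) =====
-- _APP_STATE_PRIORITY = {
--     "error": 1,
--     "not_connected": 2,
--     "max_boost": 3,
--     "charge": 4,
--     "discharge": 5,
--     "pause": 6,
--     "automatic": 7,
--     "unknown": 8,
-- }
--
-- def _dominant_app_state(app_states: list[str]) -> str:
--     """Find the dominant app_state using longest contiguous run logic.
--
--     Identifies the longest contiguous run of the same state within the list.
--     When runs tie in length, the state with higher priority wins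
--     (lower number in _APP_STATE_PRIORITY).
--
--     Appends '+' suffix when multiple distinct states are present.
--
--     Args:
--         app_states: Ordered list of app_state values from consecutive intervals.
--
--     Returns:
--         Dominant state string, optionally with '+' suffix.
--     """
--     if not app_states:
--         return "unknown"
--
--     distinct_states = set(app_states)
--
--     # Find all contiguous runs
--     runs: list[tuple[str, int]] = []
--     current_state = app_states[0]
--     current_length = 1
--
--     for state in app_states[1:]:
--         if state == current_state:
--             current_length += 1
--         else:
--             runs.append((current_state, current_length))
--             current_state = state
--             current_length = 1
--     runs.append((current_state, current_length))
--
--     # Find the longest run; tiebreaker: higher priority (lower number)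
--     best = max(
--         runs,
--         key=lambda r: (r[1], -_APP_STATE_PRIORITY.get(r[0], 99)),
--     )
--     dominant = best[0]
--
--     if len(distinct_states) > 1:
--         return dominant + "+"
--     return dominant
-- ===== SOURCE B (Python) =====
-- _APP_STATE_PRIORITY = {
--     "error": 1,
--     "not_connected": 2,
--     "max_boost": 3,
--     "charge": 4,
--     "discharge": 5,
--     "pause": 6,
--     "automatic": 7,
--     "unknown": 8,
-- }
--
--
-- def _dominant_app_state(app_states: list[str]) -> str:
--     """Boundary-index method: no run-length-encoding loop, no set().
--
--     The run starts are the positions where a neighbouring pair differs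
--     (found by zipping the list with its own tail); run lengths are the
--     differences of consecutive start positions.  min() with the negated
--     key (-length, priority) picks the same run as A's max(); the '+'
--     suffix applies exactly when there is more than one run start.
--     """
--     if not app_states:
--         return "unknown"
--     n = len(app_states)
--     starts = [0] + [i + 1 for i, (a, b) in enumerate(zip(app_states, app_states[1:])) if a != b]
--     runs = [(app_states[i], j - i) for i, j in zip(starts, starts[1:] + [n])]
--     best = min(runs, key=lambda r: (-r[1], _APP_STATE_PRIORITY.get(r[0], 99)))
--     return best[0] + "+" if len(starts) > 1 else best[0]
-- ===== Notes on version B (the rewrite author's own statement) =====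
-- stated objective: alternative
-- what changed: Replaces A's run-length-encoding accumulator loop, set() of distinct states and max(key=(len,-prio)) by a boundary-index method: run starts come from zipping the list with its own tail, run lengths from differencing consecutive starts, the winner from min() with the negated key (-len, prio), and the '+' suffix from there being more than one run start.
import Mathlib
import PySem

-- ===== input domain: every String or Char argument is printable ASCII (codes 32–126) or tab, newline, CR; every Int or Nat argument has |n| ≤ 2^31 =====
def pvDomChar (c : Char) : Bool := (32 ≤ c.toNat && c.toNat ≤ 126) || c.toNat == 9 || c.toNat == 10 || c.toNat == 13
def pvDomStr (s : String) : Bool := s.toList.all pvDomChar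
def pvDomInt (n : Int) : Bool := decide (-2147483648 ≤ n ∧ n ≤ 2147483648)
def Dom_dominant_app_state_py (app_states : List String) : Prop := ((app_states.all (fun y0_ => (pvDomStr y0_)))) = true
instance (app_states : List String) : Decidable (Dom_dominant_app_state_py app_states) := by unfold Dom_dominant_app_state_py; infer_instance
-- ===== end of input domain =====

-- B replaces A's run-length-encoding loop + set() + max() by a boundary-index method (run starts from zipping the
-- list with its tail, lengths by differencing, min() with the negated key); same O(n) cost, return value proved equal.

-- ===== PORT A =====
-- module constant _APP_STATE_PRIORITY (shared by both implementations)
def pvAppStatePriority : PySem.Dict String Int :=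
  PySem.Dict.ofList [("error", 1), ("not_connected", 2), ("max_boost", 3), ("charge", 4),
    ("discharge", 5), ("pause", 6), ("automatic", 7), ("unknown", 8)]

-- _APP_STATE_PRIORITY.get(s, 99), the expression both Pythons use
def pvPrio (s : String) : Int := PySem.Dict.getD pvAppStatePriority s 99

-- body of A's 'for state in app_states[1:]' loop; acc = (runs, current_state, current_length)
def pvRunsStep (acc : List (String × Int) × String × Int) (state : String) :
    List (String × Int) × String × Int :=
  if state == acc.2.1 then (acc.1, acc.2.1, acc.2.2 + 1)
  else (acc.1 ++ [(acc.2.1, acc.2.2)], state, 1)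

def dominant_app_state_py (app_states : List String) : String :=
  match app_states with
  | [] => "unknown"
  | h :: rest =>
    let distinct_states := PySem.Set.ofList app_states
    let st := rest.foldl pvRunsStep ([], h, 1)
    let runs := st.1 ++ [(st.2.1, st.2.2)]
    -- max(runs, key=lambda r: (r[1], -prio)); runs is nonempty so max2? is `some`, the getD default is unreachable
    let best := (PySem.List.max2? runs (fun r => r.2) (fun r => -(pvPrio r.1))).getD ("", 0)
    let dominant := best.1
    if PySem.Set.len distinct_states > 1 then dominant ++ "+" else dominant

-- ===== PORT B =====
def dominant_app_state_py_alt (app_states : List String) : String :=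
  match app_states with
  | [] => "unknown"
  | _ :: _ =>
    let n : Int := app_states.length
    -- starts = [0] + [i + 1 for i, (a, b) in enumerate(zip(app_states, app_states[1:])) if a != b]
    let starts : List Int :=
      (0 : Int) :: (PySem.List.enumerate (List.zip app_states (PySem.List.slice app_states (some 1) none)) 0).filterMap
        (fun p => if p.2.1 ≠ p.2.2 then some (p.1 + 1) else none)
    -- runs = [(app_states[i], j - i) for i, j in zip(starts, starts[1:] + [n])]
    -- app_states[i] is always in range (i is 0 or a change position), so .getD "" is exact here
    let runs := (List.zip starts (PySem.List.slice starts (some 1) none ++ [n])).map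
      (fun p => ((PySem.List.pyGet? app_states p.1).getD "", p.2 - p.1))
    -- min(runs, key=lambda r: (-r[1], prio)); runs nonempty, the getD default is unreachable
    let best := (PySem.List.min2? runs (fun r => -r.2) (fun r => pvPrio r.1)).getD ("", 0)
    if (starts.length : Int) > 1 then best.1 ++ "+" else best.1

-- ===== PRECONDITION & SPEC =====
def Spec_dominant_app_state_py (app_states : List String) (out : String) : Prop := out = dominant_app_state_py_alt app_states
instance (app_states : List String) (out : String) : Decidable (Spec_dominant_app_state_py app_states out) := by unfold Spec_dominant_app_state_py; infer_instance

-- ===== CLAIM (what is proved, stated in full; the proofs are below) =====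
def Claim_equal_dominant_app_state_py : Prop := ∀ (app_states : List String), Dom_dominant_app_state_py app_states → Spec_dominant_app_state_py app_states (dominant_app_state_py app_states)

-- ===== LEMMAS AND PROOFS =====

-- the canonical run-length encoding both run lists equal: current state cs, current length cl
def rleAux (cs : String) (cl : Int) : List String → List (String × Int)
  | [] => [(cs, cl)]
  | x :: t => if x = cs then rleAux cs (cl + 1) t else (cs, cl) :: rleAux x 1 t

-- B's change positions, recursively: pvChg xs s = the comprehension with enumerate starting at s
def pvChg : List String → Int → List Int
  | [], _ => []
  | [_], _ => []
  | x :: y :: t, s => (if x = y then [] else [s + 1]) ++ pvChg (y :: t) (s + 1)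

lemma chg_bridge : ∀ (xs : List String) (s : Int),
    (PySem.List.enumerate (List.zip xs (PySem.List.slice xs (some 1) none)) s).filterMap
      (fun p => if p.2.1 ≠ p.2.2 then some (p.1 + 1) else none) = pvChg xs s := by
  intro xs
  induction xs with
  | nil => intro s; rfl
  | cons x t ih =>
    intro s
    cases t with
    | nil => rfl
    | cons y t' =>
      rw [PySem.List.slice_from_one]
      show (PySem.List.enumerate ((x, y) :: List.zip (y :: t') t') s).filterMap _ = _
      rw [PySem.List.enumerate_cons, List.filterMap_cons]
      have ht : List.zip (y :: t') t' = List.zip (y :: t') (PySem.List.slice (y :: t') (some 1) none) := by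
        rw [PySem.List.slice_from_one]; rfl
      by_cases hxy : x = y
      · rw [ht, ih, pvChg]
        simp [hxy]
      · rw [ht, ih, pvChg]
        simp [hxy]

lemma chg_nil_iff : ∀ (t : List String) (x : String) (s : Int),
    pvChg (x :: t) s = [] ↔ ∀ y ∈ t, y = x := by
  intro t
  induction t with
  | nil => intro x s; simp [pvChg]
  | cons y t' ih =>
    intro x s
    by_cases hxy : x = y
    · subst hxy
      rw [pvChg, if_pos rfl, List.nil_append, ih]
      constructor
      · intro h z hz
        rcases List.mem_cons.mp hz with h1 | h2
        · exact h1
        · exact h z h2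
      · intro h z hz; exact h z (List.mem_cons_of_mem _ hz)
    · simp only [pvChg, if_neg hxy]
      constructor
      · intro h; exact absurd h (by simp)
      · intro h; exact absurd (h y List.mem_cons_self).symm hxy

lemma runsA_eq : ∀ (rest : List String) (runs : List (String × Int)) (cs : String) (cl : Int),
    (List.foldl pvRunsStep (runs, cs, cl) rest).1
      ++ [((List.foldl pvRunsStep (runs, cs, cl) rest).2.1, (List.foldl pvRunsStep (runs, cs, cl) rest).2.2)]
    = runs ++ rleAux cs cl rest := by
  intro rest
  induction rest with
  | nil => intro runs cs cl; simp [rleAux]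
  | cons x t ih =>
    intro runs cs cl
    by_cases hx : x = cs
    · subst hx
      rw [show List.foldl pvRunsStep (runs, x, cl) (x :: t) = List.foldl pvRunsStep (runs, x, cl + 1) t from by
          simp [List.foldl_cons, pvRunsStep]]
      rw [ih, rleAux, if_pos rfl]
    · rw [show List.foldl pvRunsStep (runs, cs, cl) (x :: t)
            = List.foldl pvRunsStep (runs ++ [(cs, cl)], x, 1) t from by
          simp [List.foldl_cons, pvRunsStep, hx]]
      rw [ih, rleAux, if_neg hx]
      simp

lemma pyGet_of_getElem? {xs : List String} {r : Int} {x : String}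
    (hr : 0 ≤ r) (h : xs[r.toNat]? = some x) :
    (PySem.List.pyGet? xs r).getD "" = x := by
  have : r = ((r.toNat : Nat) : Int) := by omega
  rw [this, PySem.List.pyGet?_natCast, h]
  rfl

lemma runsB_eq : ∀ (t : List String) (x : String) (s r : Int) (xs : List String),
    0 ≤ r → r ≤ s → xs.drop s.toNat = x :: t →
    (∀ i : Nat, r.toNat ≤ i → i ≤ s.toNat → xs[i]? = some x) →
    (List.zip (r :: pvChg (x :: t) s) (pvChg (x :: t) s ++ [(xs.length : Int)])).map
      (fun p => ((PySem.List.pyGet? xs p.1).getD "", p.2 - p.1))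
    = rleAux x (s - r + 1) t := by
  intro t
  induction t with
  | nil =>
    intro x s r xs hr hrs hdrop hconst
    have hsx : s.toNat < xs.length := by
      by_contra h
      rw [List.drop_eq_nil_of_le (by omega)] at hdrop
      exact absurd hdrop (by simp)
    have hlen : xs.length = s.toNat + 1 := by
      have := congrArg List.length hdrop
      simp [List.length_drop] at this
      omega
    have hx : xs[r.toNat]? = some x := hconst r.toNat le_rfl (by omega)
    simp only [pvChg, List.nil_append, List.zip_cons_cons, List.zip_nil_right, List.map_cons,
      List.map_nil, rleAux]
    rw [pyGet_of_getElem? hr hx]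
    have : (xs.length : Int) - r = s - r + 1 := by omega
    rw [this]
  | cons y t' ih =>
    intro x s r xs hr hrs hdrop hconst
    have hs : 0 ≤ s := le_trans hr hrs
    have hsucc : (s + 1).toNat = s.toNat + 1 := by omega
    have hgetq : ∀ k : Nat, xs[s.toNat + k]? = (x :: y :: t')[k]? := by
      intro k; rw [← hdrop, List.getElem?_drop]
    have hdrop' : xs.drop (s + 1).toNat = y :: t' := by
      rw [hsucc, ← List.tail_drop, hdrop]
      rfl
    have hy : xs[s.toNat + 1]? = some y := by simpa using hgetq 1
    by_cases hxy : x = y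
    · subst hxy
      have hconst' : ∀ i : Nat, r.toNat ≤ i → i ≤ (s + 1).toNat → xs[i]? = some x := by
        intro i h1 h2
        rw [hsucc] at h2
        rcases Nat.lt_or_ge i (s.toNat + 1) with hlt | hge
        · exact hconst i h1 (by omega)
        · have hi : i = s.toNat + 1 := by omega
          rw [hi]; exact hy
      have h2 := ih x (s + 1) r xs hr (by omega) hdrop' hconst'
      rw [show s + 1 - r + 1 = (s - r + 1) + 1 from by ring] at h2
      rw [show pvChg (x :: x :: t') s = pvChg (x :: t') (s + 1) from by
            rw [pvChg, if_pos rfl, List.nil_append]]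
      rw [show rleAux x (s - r + 1) (x :: t') = rleAux x ((s - r + 1) + 1) t' from by
            rw [rleAux, if_pos rfl]]
      exact h2
    · have hchg : pvChg (x :: y :: t') s = (s + 1) :: pvChg (y :: t') (s + 1) := by
        rw [pvChg, if_neg hxy]; rfl
      have hconst' : ∀ i : Nat, (s + 1).toNat ≤ i → i ≤ (s + 1).toNat → xs[i]? = some y := by
        intro i h1 h2
        have hi : i = s.toNat + 1 := by omega
        rw [hi]; exact hy
      have h2 := ih y (s + 1) (s + 1) xs (by omega) le_rfl hdrop' hconst'
      rw [show s + 1 - (s + 1) + 1 = (1 : Int) from by ring] at h2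
      have hx : xs[r.toNat]? = some x := hconst r.toNat le_rfl (Int.toNat_le_toNat hrs)
      rw [hchg]
      simp only [List.cons_append, List.zip_cons_cons, List.map_cons]
      rw [rleAux, if_neg (fun hc => hxy hc.symm)]
      rw [pyGet_of_getElem? hr hx, show s + 1 - r = s - r + 1 from by ring, h2]

-- the two tuple-key extremum searches pick the same element
lemma sel_eq (rs : List (String × Int)) :
    PySem.List.max2? rs (fun r => r.2) (fun r => -(pvPrio r.1))
      = PySem.List.min2? rs (fun r => -r.2) (fun r => pvPrio r.1) := by
  simp only [PySem.List.max2?, PySem.List.min2?]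
  congr 1
  funext acc x
  cases acc with
  | none => rfl
  | some m => simp [neg_lt_neg_iff]

lemma set_card (h : String) (rest : List String) :
    PySem.Set.len (PySem.Set.ofList (h :: rest)) > 1 ↔ ¬ (∀ x ∈ rest, x = h) := by
  constructor
  · intro hlen hall
    have hnd := PySem.Set.nodup_ofList (h :: rest)
    have hmem : ∀ y ∈ PySem.Set.ofList (h :: rest), y = h := by
      intro y hy
      rcases List.mem_cons.mp ((PySem.Set.mem_ofList _ _).mp hy) with h1 | h2
      · exact h1
      · exact hall y h2
    cases hc : PySem.Set.ofList (h :: rest) with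
    | nil => rw [hc] at hlen; simp [PySem.Set.len] at hlen
    | cons a l =>
      have ha : a = h := hmem a (hc ▸ List.mem_cons_self)
      have hl : l = [] := by
        rw [List.eq_nil_iff_forall_not_mem]
        intro b hb
        have hb' : b = h := hmem b (hc ▸ List.mem_cons_of_mem _ hb)
        have hnd' := hc ▸ hnd
        exact (List.nodup_cons.mp hnd').1 (by rw [ha, ← hb']; exact hb)
      rw [hc, hl] at hlen
      simp [PySem.Set.len] at hlen
  · intro hnall
    obtain ⟨x, hx, hxh⟩ : ∃ x ∈ rest, ¬ x = h := by simpa using hnall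
    have h1 : h ∈ PySem.Set.ofList (h :: rest) :=
      (PySem.Set.mem_ofList _ _).mpr List.mem_cons_self
    have h2 : x ∈ PySem.Set.ofList (h :: rest) :=
      (PySem.Set.mem_ofList _ _).mpr (List.mem_cons_of_mem _ hx)
    cases hc : PySem.Set.ofList (h :: rest) with
    | nil => rw [hc] at h1; simp at h1
    | cons a l =>
      cases l with
      | nil =>
        rw [hc] at h1 h2
        simp at h1 h2
        exact absurd (h2.trans h1.symm) hxh
      | cons b l2 =>
        simp [PySem.Set.len]

lemma main_eq (h : String) (rest : List String) :
    dominant_app_state_py (h :: rest) = dominant_app_state_py_alt (h :: rest) := by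
  simp only [dominant_app_state_py, dominant_app_state_py_alt]
  rw [chg_bridge, PySem.List.slice_from_one]
  have hA := runsA_eq rest [] h 1
  simp only [List.nil_append] at hA
  have hconst0 : ∀ i : Nat, (0 : Int).toNat ≤ i → i ≤ (0 : Int).toNat → (h :: rest)[i]? = some h := by
    intro i h1 h2
    have hi : i = 0 := by omega
    subst hi
    rfl
  have hB := runsB_eq rest h 0 0 (h :: rest) le_rfl le_rfl (by simp) hconst0
  rw [show ((0 : Int) :: pvChg (h :: rest) 0).tail = pvChg (h :: rest) 0 from rfl]
  rw [show (0 : Int) - 0 + 1 = 1 from by ring] at hB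
  rw [hA, hB, sel_eq]
  by_cases hall : ∀ y ∈ rest, y = h
  · rw [if_neg (fun hc => (set_card h rest).mp hc hall),
        if_neg (by
          rw [(chg_nil_iff rest h 0).mpr hall]
          simp)]
  · rw [if_pos ((set_card h rest).mpr hall),
        if_pos (by
          have hne : pvChg (h :: rest) 0 ≠ [] := fun hc => hall ((chg_nil_iff rest h 0).mp hc)
          cases hc : pvChg (h :: rest) 0 with
          | nil => exact absurd hc hne
          | cons a l => simp)]

-- ===== VERDICT (by name: the statement is the Claim_ definition above) =====
theorem dominant_app_state_py_spec : Claim_equal_dominant_app_state_py := by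
  intro app_states _
  unfold Spec_dominant_app_state_py
  cases app_states with
  | nil => rfl
  | cons h rest => exact main_eq h rest
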